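-- pv_equiv track=rewrite | github.com/Darkhunter9/python | Cow.py | cowsay
-- ===== SOURCE A (Python) =====
-- COW = r'''
--         \   ^__^
--          \  (oo)\_______
--             (__)\       )\/\
--                 ||----w |
--                 ||     ||
-- '''
--
-- def cowsay(text):
--     result = ""
--     temptext = text
--
--     # remove multiple spaces
--     i = 0
--     while i < len(temptext)-1:
--         if temptext[i] == " " and temptext[i+1] == " ":
--             temptext = temptext[:i]+temptext[i+1:]
--             i = 0
--         else:
--             i += 1
--
--     # judge length
--
--     if len(temptext) < 40:
--         temptext = "< "+temptext+" >\n"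
--         firstline = "\n "+"_"*(len(temptext)-3)+"\n"
--         lastline = " "+"-"*(len(temptext)-3)
--         return firstline+temptext+lastline+COW
--
--     else:
--         tempresult = []
--         spacelist = []
--         for i in range(len(temptext)):
--             if temptext[i] == " ":
--                 spacelist.append(i)
--         spacelist.append(len(temptext))
--
--         pointer = -1
--         while spacelist:
--             if spacelist[0]-pointer > 40:
--                 tempresult.append(temptext[pointer+1:pointer+40])
--                 pointer += 39
--             else:
--                 j = spacelist.pop(0)
--                 if spacelist:
--                     if spacelist[0]-pointer > 40:
--                         tempresult.append(temptext[pointer+1:j])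
--                         pointer = j
--                 else:
--                     tempresult.append(temptext[pointer+1:])
--
--         length = max(len(tempresult[i]) for i in range(len(tempresult)))
--         for i in range(len(tempresult)):
--             tempresult[i] += " "*(length-len(tempresult[i]))
--             if i == 0:
--                 tempresult[i] = "/ " +tempresult[i]+" \\"+"\n"
--             elif i == len(tempresult)-1:
--                 tempresult[i] = "\ " +tempresult[i]+" /\n"
--             else:
--                 tempresult[i] = "| " +tempresult[i]+" |\n"
--             result += tempresult[i]
--
--         firstline = "\n "+"_"*(length+2)+"\n"
--         lastline = " "+"-"*(length+2)
--         return firstline+result+lastline+COW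
-- ===== SOURCE B (Python) =====
-- COW = r'''
--         \   ^__^
--          \  (oo)\_______
--             (__)\       )\/\
--                 ||----w |
--                 ||     ||
-- '''
--
-- def _collapse(text):
--     # copy characters, emitting one space per run of spaces (run skipped in an inner loop)
--     out = []
--     i, n = 0, len(text)
--     while i < n:
--         c = text[i]
--         out.append(c)
--         i += 1
--         if c == " ":
--             while i < n and text[i] == " ":
--                 i += 1
--     return "".join(out)
--
-- def _wrap(t):
--     # split into words once, then greedily pack words into lines of width <= 39,
--     # hard-chunking any word longer than 39
--     words = t.split(" ")
--     lines = []
--     cur = words[0]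
--     while len(cur) > 39:
--         lines.append(cur[:39])
--         cur = cur[39:]
--     for w in words[1:]:
--         if len(cur) + 1 + len(w) <= 39:
--             cur += " " + w
--         else:
--             lines.append(cur)
--             cur = w
--             while len(cur) > 39:
--                 lines.append(cur[:39])
--                 cur = cur[39:]
--     lines.append(cur)
--     return lines
--
-- def _rows(ls, width):
--     # middle and last rows of the bubble: pipe rows, backslash row for the final one
--     out = []
--     k, n = 0, len(ls)
--     while k < n:
--         p = ls[k] + " " * (width - len(ls[k]))
--         out.append("\\ " + p + " /\n" if k == n - 1 else "| " + p + " |\n")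
--         k += 1
--     return "".join(out)
--
-- def cowsay(text):
--     t = _collapse(text)
--     if len(t) < 40:
--         width, body = len(t), "< " + t + " >\n"
--     else:
--         lines = _wrap(t)
--         width = max(len(l) for l in lines)
--         head = lines[0] + " " * (width - len(lines[0]))
--         body = "/ " + head + " \\\n" + _rows(lines[1:], width)
--     return "\n " + "_" * (width + 2) + "\n" + body + " " + "-" * (width + 2) + COW
-- ===== Notes on version B (the rewrite author's own statement) =====
-- stated objective: alternative
-- what changed: A's restart-from-index-0 double-space deletion becomes a run-skipping copy pass, A's precomputed spacelist with pop(0)/pointer arithmetic becomes a split-into-words pass followed by greedy word packing with hard chunking of over-long words, and A's in-place list-mutating decoration loop becomes a separate row builder under a shared frame helper.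
import Mathlib
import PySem

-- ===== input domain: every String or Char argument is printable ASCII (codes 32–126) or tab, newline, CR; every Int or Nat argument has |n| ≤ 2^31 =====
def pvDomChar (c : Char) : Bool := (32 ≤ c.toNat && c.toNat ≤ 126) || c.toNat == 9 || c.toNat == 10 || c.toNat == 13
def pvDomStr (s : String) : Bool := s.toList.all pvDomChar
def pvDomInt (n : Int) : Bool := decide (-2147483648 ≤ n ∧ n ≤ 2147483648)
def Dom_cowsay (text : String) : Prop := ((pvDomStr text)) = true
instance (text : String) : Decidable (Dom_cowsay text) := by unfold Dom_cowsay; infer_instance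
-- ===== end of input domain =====

-- B rebuilds the same speech bubble from a run-skipping space collapse, a split-into-words
-- greedy line packing, and a separate row builder under one frame helper, replacing A's
-- restart-from-0 deletion loop and spacelist/pop(0) pointer loop (objective: alternative).

-- the module constant COW, shared by both ports
def pvCOW : List Char :=
  "\n        \\   ^__^\n         \\  (oo)\\_______\n            (__)\\       )\\/\\\n                ||----w |\n                ||     ||\n".toList

-- ===== PORT A =====

-- A's space-collapse loop: on a double space, delete the first and restart i at 0.
-- temptext[:i] + temptext[i+1:] with 0 ≤ i < len is ported with PySem slices.
def cowsayCollapseA (t : List Char) (i : Nat) : List Char :=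
  if h : i + 1 < t.length then   -- Python: i < len(temptext) - 1 (over ints)
    if t[i]! = ' ' ∧ t[i+1]! = ' ' then
      cowsayCollapseA (PySem.List.slice t none (some (i:Int)) ++
                       PySem.List.slice t (some ((i:Int)+1)) none) 0
    else cowsayCollapseA t (i+1)
  else t
termination_by (t.length, t.length - i)
decreasing_by
  · refine Prod.Lex.left _ _ ?_
    have e1 : PySem.List.slice t none (some (i:Int)) = t.take i :=
      PySem.List.slice_to_natCast t i
    have e2 : PySem.List.slice t (some ((i:Int)+1)) none = t.drop (i+1) := by
      have hc : ((i:Int)+1) = ((i+1:Nat):Int) := by push_cast; ring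
      rw [hc, PySem.List.slice_from_natCast]
    rw [e1, e2, List.length_append, List.length_take, List.length_drop]
    omega
  · exact Prod.Lex.right _ (by omega)

-- A's spacelist-building for loop
def cowsaySpacesA (t : List Char) : List Nat :=
  (List.range t.length).foldl (fun acc i => if t[i]! = ' ' then acc ++ [i] else acc) []

-- A's wrap loop over (tempresult, spacelist, pointer)
def cowsayWrapA (t : List Char) (res : List (List Char)) (sl : List Nat) (p : Int) :
    List (List Char) :=
  match sl with
  | [] => res
  | j :: rest =>
    if (j:Int) - p > 40 then
      cowsayWrapA t (res ++ [PySem.List.slice t (some (p+1)) (some (p+40))]) (j :: rest) (p+39)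
    else
      match rest with
      | [] => res ++ [PySem.List.slice t (some (p+1)) none]
      | k :: tail =>
        if (k:Int) - p > 40 then
          cowsayWrapA t (res ++ [PySem.List.slice t (some (p+1)) (some (j:Int))]) (k :: tail) (j:Int)
        else
          cowsayWrapA t res (k :: tail) p
termination_by (sl.length, (((sl.headD 0 : Nat):Int) - p).toNat)
decreasing_by
  · exact Prod.Lex.right _ (by simp only [List.headD_cons]; omega)
  · exact Prod.Lex.left _ _ (by simp)
  · exact Prod.Lex.left _ _ (by simp)

-- A's formatting loop: pads tempresult[i] in place, decorates it, appends it to result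
def cowsayFmtA (nl width : Nat) (tr : List (List Char)) (i : Nat) (res : List Char) :
    List Char :=
  if i < nl then
    let padded := tr[i]! ++ List.replicate (width - tr[i]!.length) ' '
    let dec :=
      if i = 0 then ('/' :: ' ' :: padded) ++ (' ' :: '\\' :: '\n' :: [])
      else if i = nl - 1 then ('\\' :: ' ' :: padded) ++ (' ' :: '/' :: '\n' :: [])
      else ('|' :: ' ' :: padded) ++ (' ' :: '|' :: '\n' :: [])
    cowsayFmtA nl width (tr.set i dec) (i+1) (res ++ dec)
  else res
termination_by nl - i

def cowsay (text : String) : String :=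
  let temptext := cowsayCollapseA text.toList 0
  if temptext.length < 40 then
    let tt := ('<' :: ' ' :: temptext) ++ (' ' :: '>' :: '\n' :: [])
    let firstline := '\n' :: ' ' :: (List.replicate (tt.length - 3) '_' ++ ['\n'])
    let lastline := ' ' :: List.replicate (tt.length - 3) '-'
    String.ofList (firstline ++ tt ++ lastline ++ pvCOW)
  else
    let sl := cowsaySpacesA temptext ++ [temptext.length]
    let tempresult := cowsayWrapA temptext [] sl (-1)
    -- Python max over a nonempty generator (tempresult is never empty here)
    let width := (PySem.List.max?
      ((List.range tempresult.length).map (fun i => tempresult[i]!.length))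
      (fun y => y)).getD 0
    let result := cowsayFmtA tempresult.length width tempresult 0 []
    String.ofList (('\n' :: ' ' :: (List.replicate (width + 2) '_' ++ ['\n'])) ++ result ++
               (' ' :: List.replicate (width + 2) '-') ++ pvCOW)

-- ===== PORT B =====

-- B's collapse: copy characters, skipping the rest of each run of spaces
-- (the Python inner `while` that advances past the run is the dropWhile)
def bCollapse : List Char → List Char
  | [] => []
  | c :: r =>
    if c = ' ' then ' ' :: bCollapse (r.dropWhile (fun x => x = ' '))
    else c :: bCollapse r
termination_by l => l.length
decreasing_by
  all_goals have h := List.length_dropWhile_le (fun x => x = ' ') r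
  all_goals simp only [List.length_cons]
  all_goals omega

-- hand port of Python's t.split(" ") (exact for a one-character separator)
def bSplit : List Char → List (List Char)
  | [] => [[]]
  | c :: r =>
    if c = ' ' then [] :: bSplit r
    else
      match bSplit r with
      | [] => [[c]]            -- unreachable: bSplit never returns []
      | w :: ws => (c :: w) :: ws

-- B's `while len(cur) > 39` hard-chunking loop
def bChunk (acc : List (List Char)) (cur : List Char) : List (List Char) × List Char :=
  if 39 < cur.length then bChunk (acc ++ [cur.take 39]) (cur.drop 39) else (acc, cur)
termination_by cur.length
decreasing_by simp; omega

-- B's packing step for one word: extend the current line or flush it and chunk the word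
def bStep (st : List (List Char) × List Char) (w : List Char) : List (List Char) × List Char :=
  if st.2.length + 1 + w.length ≤ 39 then (st.1, st.2 ++ ' ' :: w)
  else bChunk (st.1 ++ [st.2]) w

def bWrap (t : List Char) : List (List Char) :=
  match bSplit t with
  | [] => []                   -- unreachable: bSplit never returns []
  | w :: ws =>
    let st := ws.foldl bStep (bChunk [] w)
    st.1 ++ [st.2]

def bPad (width : Nat) (l : List Char) : List Char :=
  l ++ List.replicate (width - l.length) ' '

-- B's recursive row builder for the middle and last bubble rows
def bRows (width : Nat) : List (List Char) → List Char
  | [] => []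
  | [l] => '\\' :: ' ' :: (bPad width l ++ [' ', '/', '\n'])
  | l :: ls => ('|' :: ' ' :: (bPad width l ++ [' ', '|', '\n'])) ++ bRows width ls

-- B's shared frame around the bubble body
def bFrame (width : Nat) (body : List Char) : List Char :=
  '\n' :: ' ' :: (List.replicate (width + 2) '_' ++
    '\n' :: (body ++ ' ' :: (List.replicate (width + 2) '-' ++ pvCOW)))

def cowsay_alt (text : String) : String :=
  let t := bCollapse text.toList
  if t.length < 40 then
    String.ofList (bFrame t.length (('<' :: ' ' :: t) ++ [' ', '>', '\n']))
  else
    let lines := bWrap t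
    -- Python: max(len(l) for l in lines); lines is never empty
    let width := (PySem.List.max? (lines.map (fun l => l.length)) (fun y => y)).getD 0
    String.ofList (bFrame width
      (('/' :: ' ' :: bPad width (lines.headD [])) ++ [' ', '\\', '\n'] ++
        bRows width (lines.drop 1)))

-- ===== PRECONDITION & SPEC =====
def Spec_cowsay (text : String) (out : String) : Prop := out = cowsay_alt text
instance (text : String) (out : String) : Decidable (Spec_cowsay text out) := by unfold Spec_cowsay; infer_instance

-- ===== CLAIM (what is proved, stated in full; the proofs are below) =====
def Claim_equal_cowsay : Prop := ∀ (text : String), Dom_cowsay text → Spec_cowsay text (cowsay text)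

-- ===== LEMMAS AND PROOFS =====

-- ---- collapse: both sides equal the canonical squeeze pvSq2 ----

def pvSq2 (prev : Bool) : List Char → List Char
  | [] => []
  | c :: r => if c = ' ' ∧ prev = true then pvSq2 prev r else c :: pvSq2 (decide (c = ' ')) r

theorem pvSq2_nd (l : List Char) : ∀ (c : Char),
    (∀ j, j + 1 < (c :: l).length → ¬((c :: l)[j]! = ' ' ∧ (c :: l)[j+1]! = ' ')) →
    pvSq2 (decide (c = ' ')) l = l := by
  induction l with
  | nil => intro c _; simp [pvSq2]
  | cons b r ih =>
    intro c H
    have h0 := H 0 (by simp)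
    simp at h0
    unfold pvSq2
    split
    · exfalso
      rename_i hsp
      have hb : b = ' ' := hsp.1
      have hc : c = ' ' := by simpa using hsp.2
      exact (h0 hc) hb
    · rw [ih b (fun j hj => by
        have := H (j+1) (by simpa using hj)
        simpa using this)]

theorem pvSq2_delete : ∀ (i : Nat) (l : List Char) (prev : Bool),
    i + 1 < l.length → l[i]! = ' ' → l[i+1]! = ' ' →
    pvSq2 prev (l.take i ++ l.drop (i+1)) = pvSq2 prev l := by
  intro i
  induction i with
  | zero =>
    intro l prev hlen h0 h1
    match l, hlen with
    | a :: b :: r, _ =>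
      have ha : a = ' ' := by simpa using h0
      have hb : b = ' ' := by simpa using h1
      subst ha hb
      cases prev <;> simp [pvSq2]
  | succ i ih =>
    intro l prev hlen h0 h1
    match l, hlen with
    | c :: l', hlen =>
      have h0' : l'[i]! = ' ' := by simpa using h0
      have h1' : l'[i+1]! = ' ' := by simpa using h1
      have hlen' : i + 1 < l'.length := by simpa using hlen
      simp only [List.take_succ_cons, List.drop_succ_cons, List.cons_append]
      unfold pvSq2
      rw [ih l' prev hlen' h0' h1', ih l' (decide (c = ' ')) hlen' h0' h1']

theorem pvSq2_all_nd (l : List Char)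
    (H : ∀ j, j + 1 < l.length → ¬(l[j]! = ' ' ∧ l[j+1]! = ' ')) :
    pvSq2 false l = l := by
  cases l with
  | nil => rfl
  | cons c r =>
    unfold pvSq2
    rw [if_neg (by simp), pvSq2_nd r c H]

theorem collapseA_eq_pvSq2 (t : List Char) (i : Nat) :
    (∀ j, j + 1 < min (i+1) t.length → ¬(t[j]! = ' ' ∧ t[j+1]! = ' ')) →
    cowsayCollapseA t i = pvSq2 false t := by
  fun_induction cowsayCollapseA t i with
  | case1 t i h hsp ih =>
    intro _
    have e1 : PySem.List.slice t none (some (i:Int)) = t.take i :=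
      PySem.List.slice_to_natCast t i
    have e2 : PySem.List.slice t (some ((i:Int)+1)) none = t.drop (i+1) := by
      have hc : ((i:Int)+1) = ((i+1:Nat):Int) := by push_cast; ring
      rw [hc, PySem.List.slice_from_natCast]
    rw [e1, e2] at ih ⊢
    rw [ih (by omega), pvSq2_delete i t false h hsp.1 hsp.2]
  | case2 t i h hsp ih =>
    intro H
    refine ih (fun j hj => ?_)
    by_cases hji : j = i
    · subst hji; exact hsp
    · exact H j (by omega)
  | case3 t i h =>
    intro H
    exact (pvSq2_all_nd t (fun j hj => H j (by omega))).symm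

theorem pvSq2_true_drop (r : List Char) :
    pvSq2 true r = pvSq2 false (r.dropWhile (fun x => x = ' ')) := by
  induction r with
  | nil => rfl
  | cons c r ih =>
    by_cases hc : c = ' '
    · subst hc
      simp only [pvSq2, List.dropWhile_cons]
      simpa using ih
    · simp [pvSq2, hc]

theorem bCollapse_eq_pvSq2 (l : List Char) : bCollapse l = pvSq2 false l := by
  fun_induction bCollapse l with
  | case1 => rfl
  | case2 r ih =>
    rw [ih, ← pvSq2_true_drop]
    simp [pvSq2]
  | case3 c r hc ih =>
    simp [pvSq2, hc, ih]

theorem cowsay_collapse_eq (l : List Char) : cowsayCollapseA l 0 = bCollapse l := by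
  rw [collapseA_eq_pvSq2 l 0 (by intro j hj; omega), bCollapse_eq_pvSq2]

-- ---- proof-side greedy index wrap (the bridge between A's wrap and B's word packing) ----

def cowsayNextSp (t : List Char) (i : Nat) : Nat :=
  if h : i < t.length then (if t[i]! = ' ' then i else cowsayNextSp t (i+1)) else i
termination_by t.length - i

theorem cowsayNextSp_ge (t : List Char) (i : Nat) : i ≤ cowsayNextSp t i := by
  fun_induction cowsayNextSp <;> omega

theorem cowsayNextSp_le (t : List Char) (i : Nat) (h : i ≤ t.length) :
    cowsayNextSp t i ≤ t.length := by
  fun_induction cowsayNextSp <;> omega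

theorem cowsayNextSp_cases (t : List Char) (i : Nat) :
    cowsayNextSp t i ≤ t.length ∨ cowsayNextSp t i = i := by
  fun_induction cowsayNextSp <;> omega

def cowsayExtB (t : List Char) (s e : Nat) : Nat :=
  if h : e < t.length then
    let k := cowsayNextSp t (e+1)
    if (k:Int) - (s:Int) > 39 then e else cowsayExtB t s k
  else e
termination_by t.length - e
decreasing_by
  have h1 := cowsayNextSp_ge t (e+1)
  have h2 := cowsayNextSp_le t (e+1) (by omega)
  omega

theorem cowsayExtB_ge (t : List Char) (s e : Nat) : e ≤ cowsayExtB t s e := by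
  fun_induction cowsayExtB with
  | case1 => omega
  | case2 e h k hk ih => have := cowsayNextSp_ge t (e+1); omega
  | case3 => omega

def cowsayWrapB (t : List Char) (acc : List (List Char)) (s : Nat) : List (List Char) :=
  let j := cowsayNextSp t s
  if hj : (j:Int) - (s:Int) > 39 then
    cowsayWrapB t (acc ++ [(t.drop s).take 39]) (s + 39)
  else
    let e := cowsayExtB t s j
    let line := (t.drop s).take (e - s)
    if t.length ≤ e then acc ++ [line]
    else cowsayWrapB t (acc ++ [line]) (e + 1)
termination_by t.length + 1 - s
decreasing_by
  · have h2 := cowsayNextSp_cases t s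
    omega
  · rename_i hlt
    have h1 : s ≤ j := cowsayNextSp_ge t s
    have h2 := cowsayExtB_ge t s j
    have h3 : cowsayExtB t s j = cowsayExtB t s (cowsayNextSp t s) := rfl
    omega

-- ---- A's wrap equals the greedy index wrap (spacelist machinery) ----

def pvSpFrom (t : List Char) (s : Nat) : List Nat :=
  if h : s < t.length then
    (if t[s]! = ' ' then s :: pvSpFrom t (s+1) else pvSpFrom t (s+1))
  else []
termination_by t.length - s

theorem pvGetBang {t : List Char} {s : Nat} (h : s < t.length) : t[s]! = t[s] := by
  rw [List.getElem!_eq_getElem?_getD, List.getElem?_eq_getElem h]; rfl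

theorem cowsayNextSp_eq_self {t : List Char} {s : Nat} (h : s < t.length)
    (hs : t[s]! = ' ') : cowsayNextSp t s = s := by
  conv_lhs => rw [cowsayNextSp]
  rw [pvGetBang h] at hs
  simp [h, hs]

theorem cowsayNextSp_eq_succ {t : List Char} {s : Nat} (h : s < t.length)
    (hs : ¬ t[s]! = ' ') : cowsayNextSp t s = cowsayNextSp t (s+1) := by
  conv_lhs => rw [cowsayNextSp]
  rw [pvGetBang h] at hs
  simp [h, hs]

theorem cowsayNextSp_eq_stop {t : List Char} {s : Nat} (h : ¬ s < t.length) :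
    cowsayNextSp t s = s := by
  conv_lhs => rw [cowsayNextSp]
  simp [h]

theorem pvSpFrom_cons {t : List Char} {s : Nat} (h : s < t.length)
    (hs : t[s]! = ' ') : pvSpFrom t s = s :: pvSpFrom t (s+1) := by
  conv_lhs => rw [pvSpFrom]
  rw [pvGetBang h] at hs
  simp [h, hs]

theorem pvSpFrom_skip {t : List Char} {s : Nat} (h : s < t.length)
    (hs : ¬ t[s]! = ' ') : pvSpFrom t s = pvSpFrom t (s+1) := by
  conv_lhs => rw [pvSpFrom]
  rw [pvGetBang h] at hs
  simp [h, hs]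

theorem pvSpFrom_nil {t : List Char} {s : Nat} (h : ¬ s < t.length) :
    pvSpFrom t s = [] := by
  conv_lhs => rw [pvSpFrom]
  simp [h]

theorem pvSpFrom_unfold (t : List Char) (s : Nat) (hs : s ≤ t.length) :
    pvSpFrom t s =
      if cowsayNextSp t s < t.length then
        cowsayNextSp t s :: pvSpFrom t (cowsayNextSp t s + 1)
      else [] := by
  fun_induction pvSpFrom t s with
  | case1 s h hsp ih =>
    rw [cowsayNextSp_eq_self h hsp, if_pos h]
  | case2 s h hsp ih =>
    rw [cowsayNextSp_eq_succ h hsp]; exact ih (by omega)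
  | case3 s h =>
    rw [cowsayNextSp_eq_stop h, if_neg (by omega)]

theorem pvSpFrom_shift (t : List Char) : ∀ (d s m : Nat), m - s ≤ d → s ≤ m →
    m ≤ cowsayNextSp t s → pvSpFrom t s = pvSpFrom t m := by
  intro d
  induction d with
  | zero =>
    intro s m h1 h2 h3
    exact congrArg (pvSpFrom t) (by omega)
  | succ d ih =>
    intro s m h1 h2 h3
    by_cases hsm : s = m
    · rw [hsm]
    · by_cases hsl : s < t.length
      · have hsp : ¬ t[s]! = ' ' := by
          intro hc
          have := cowsayNextSp_eq_self hsl hc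
          omega
        rw [pvSpFrom_skip hsl hsp]
        have e2 := cowsayNextSp_eq_succ hsl hsp
        exact ih (s+1) m (by omega) (by omega) (by omega)
      · have hns := cowsayNextSp_eq_stop hsl
        rw [pvSpFrom_nil hsl, pvSpFrom_nil (t := t) (s := m) (by omega)]

theorem pvSpFrom_eq_filter (t : List Char) : ∀ (d s : Nat), t.length - s ≤ d →
    (List.range' s (t.length - s)).filter (fun i => decide (t[i]! = ' ')) = pvSpFrom t s := by
  intro d
  induction d with
  | zero =>
    intro s h
    have h1 : t.length - s = 0 := by omega
    rw [h1, pvSpFrom_nil (by omega)]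
    rfl
  | succ d ih =>
    intro s h
    by_cases hs : s < t.length
    · have h1 : t.length - s = (t.length - (s+1)) + 1 := by omega
      rw [h1, List.range'_succ, List.filter_cons]
      by_cases hsp : t[s]! = ' '
      · rw [pvSpFrom_cons hs hsp]
        simp only [hsp, decide_true, if_pos]
        rw [ih (s+1) (by omega)]
      · rw [pvSpFrom_skip hs hsp]
        simp only [hsp, decide_false]
        simp only [Bool.false_eq_true, ite_false]
        rw [ih (s+1) (by omega)]
    · have h1 : t.length - s = 0 := by omega
      rw [h1, pvSpFrom_nil hs]
      rfl

theorem cowsaySpacesA_eq (t : List Char) : cowsaySpacesA t = pvSpFrom t 0 := by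
  unfold cowsaySpacesA
  have hf : (fun (acc : List Nat) (i : Nat) => if t[i]! = ' ' then acc ++ [i] else acc)
      = (fun acc x => if (fun i => decide (t[i]! = ' ')) x = true then acc ++ [x] else acc) := by
    funext a b; split_ifs <;> simp_all
  rw [hf, PySem.List.foldl_append_if (fun i => decide (t[i]! = ' ')) (fun i => i), List.map_id',
      List.range_eq_range']
  have := pvSpFrom_eq_filter t t.length 0 (by omega)
  simpa using this

def pvContB (t : List Char) (s e : Nat) (res : List (List Char)) : List (List Char) :=
  if t.length ≤ e then res ++ [(t.drop s).take (e - s)]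
  else cowsayWrapB t (res ++ [(t.drop s).take (e - s)]) (e + 1)

theorem pvSliceA (t : List Char) (s k : Nat) :
    PySem.List.slice t (some ((s:Int) - 1 + 1)) (some (k:Int)) = (t.drop s).take (k - s) := by
  have h1 : ((s:Int) - 1 + 1) = ((s:Nat):Int) := by ring
  rw [h1, PySem.List.slice_natCast]

theorem pvSliceFromA (t : List Char) (s : Nat) :
    PySem.List.slice t (some ((s:Int) - 1 + 1)) none = t.drop s := by
  have h1 : ((s:Int) - 1 + 1) = ((s:Nat):Int) := by ring
  rw [h1, PySem.List.slice_from_natCast]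

theorem pvSliceChunkA (t : List Char) (s : Nat) :
    PySem.List.slice t (some ((s:Int) - 1 + 1)) (some ((s:Int) - 1 + 40)) = (t.drop s).take 39 := by
  have h1 : ((s:Int) - 1 + 1) = ((s:Nat):Int) := by ring
  have h2 : ((s:Int) - 1 + 40) = ((s:Nat):Int) + ((39:Nat):Int) := by push_cast; ring
  rw [h1, h2, PySem.List.slice_natCast_add]

theorem pvExtB_step {t : List Char} {s e : Nat} (h : e < t.length)
    (hk : cowsayNextSp t (e+1) ≤ s + 39) :
    cowsayExtB t s e = cowsayExtB t s (cowsayNextSp t (e+1)) := by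
  conv_lhs => rw [cowsayExtB]
  simp only [h, dif_pos]
  rw [if_neg (by omega)]

theorem pvExtB_break {t : List Char} {s e : Nat} (h : e < t.length)
    (hk : s + 40 ≤ cowsayNextSp t (e+1)) :
    cowsayExtB t s e = e := by
  conv_lhs => rw [cowsayExtB]
  simp only [h, dif_pos]
  rw [if_pos (by omega)]

theorem pvExtB_stop {t : List Char} {s e : Nat} (h : ¬ e < t.length) :
    cowsayExtB t s e = e := by
  conv_lhs => rw [cowsayExtB]
  simp [h]

theorem pvTakeAll (t : List Char) (s : Nat) :
    (t.drop s).take (t.length - s) = t.drop s := by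
  apply List.take_of_length_le; simp

theorem pvAux (t : List Char) (s : Nat)
    (HM : ∀ s' res, s < s' → s' ≤ t.length →
      cowsayWrapA t res (pvSpFrom t s' ++ [t.length]) ((s':Int)-1) = cowsayWrapB t res s') :
    ∀ (d e : Nat) (res : List (List Char)), t.length - e ≤ d → s ≤ e → e < t.length →
    cowsayNextSp t (e+1) ≤ s + 39 →
    cowsayWrapA t res (pvSpFrom t (e+1) ++ [t.length]) ((s:Int)-1) =
      pvContB t s (cowsayExtB t s e) res := by
  intro d
  induction d with
  | zero => intro e res h1 h2 h3 h4; omega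
  | succ d ih =>
    intro e res h1 h2 h3 h4
    have hk_ge : e + 1 ≤ cowsayNextSp t (e+1) := cowsayNextSp_ge t (e+1)
    have hk_le : cowsayNextSp t (e+1) ≤ t.length := cowsayNextSp_le t (e+1) (by omega)
    set k := cowsayNextSp t (e+1) with hkdef
    rw [pvExtB_step h3 h4]
    rw [pvSpFrom_unfold t (e+1) (by omega), ← hkdef]
    by_cases hkn : k < t.length
    · rw [if_pos hkn]
      simp only [List.cons_append]
      have hk2_ge := cowsayNextSp_ge t (k+1)
      have hk2_le := cowsayNextSp_le t (k+1) (by omega)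
      set k2 := cowsayNextSp t (k+1) with hk2def
      rw [pvSpFrom_unfold t (k+1) (by omega), ← hk2def]
      by_cases hk2n : k2 < t.length
      · rw [if_pos hk2n]
        simp only [List.cons_append]
        rw [cowsayWrapA, if_neg (by omega)]
        by_cases hbig : (s:Int) + 40 ≤ (k2:Int)
        · rw [if_pos (by omega), pvSliceA]
          have hc : ((k:Int)) = (((k+1:Nat)):Int) - 1 := by push_cast; ring
          rw [pvExtB_break hkn (by omega), pvContB, if_neg (by omega), hc]
          have hm := HM (k+1) (res ++ [(t.drop s).take (k - s)]) (by omega) (by omega)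
          rw [pvSpFrom_unfold t (k+1) (by omega), ← hk2def] at hm
          rw [if_pos hk2n] at hm
          simp only [List.cons_append] at hm
          exact hm
        · rw [if_neg (by omega), pvExtB_step hkn (by omega), ← hk2def]
          have hrec := ih k res (by omega) (by omega) (by omega) (by omega)
          rw [pvSpFrom_unfold t (k+1) (by omega), ← hk2def] at hrec
          rw [if_pos hk2n] at hrec
          simp only [List.cons_append] at hrec
          rw [pvExtB_step hkn (by omega), ← hk2def] at hrec
          exact hrec
      · rw [if_neg hk2n]
        simp only [List.nil_append]
        rw [cowsayWrapA, if_neg (by omega)]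
        by_cases hbig : (s:Int) + 40 ≤ (t.length:Int)
        · rw [if_pos (by omega), pvSliceA]
          have hc : ((k:Int)) = (((k+1:Nat)):Int) - 1 := by push_cast; ring
          rw [pvExtB_break hkn (by omega), pvContB, if_neg (by omega), hc]
          have hm := HM (k+1) (res ++ [(t.drop s).take (k - s)]) (by omega) (by omega)
          rw [pvSpFrom_unfold t (k+1) (by omega), ← hk2def] at hm
          rw [if_neg hk2n] at hm
          simp only [List.nil_append] at hm
          exact hm
        · rw [if_neg (by omega), pvExtB_step hkn (by omega), ← hk2def]
          have hk2n' : k2 = t.length := by omega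
          rw [pvExtB_stop (by omega), pvContB, if_pos (by omega), hk2n']
          rw [cowsayWrapA, if_neg (by omega), pvSliceFromA, pvTakeAll]
    · have hkn' : k = t.length := by omega
      rw [if_neg hkn]
      simp only [List.nil_append]
      rw [cowsayWrapA, if_neg (by omega)]
      rw [pvExtB_stop (by omega), pvContB, if_pos (by omega), hkn', pvTakeAll, pvSliceFromA]

theorem pvWrapA_chunk (t : List Char) (res : List (List Char)) (j : Nat) (rest : List Nat)
    (p : Int) (h : (j:Int) - p > 40) :
    cowsayWrapA t res (j :: rest) p =
      cowsayWrapA t (res ++ [PySem.List.slice t (some (p+1)) (some (p+40))]) (j :: rest) (p+39) := by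
  cases rest with
  | nil => rw [cowsayWrapA, if_pos h]
  | cons k tail => rw [cowsayWrapA, if_pos h]

theorem pvWrapB_big (t : List Char) (s : Nat) (res : List (List Char))
    (h : (cowsayNextSp t s : Int) - (s:Int) > 39) :
    cowsayWrapB t res s = cowsayWrapB t (res ++ [(t.drop s).take 39]) (s + 39) := by
  conv_lhs => rw [cowsayWrapB]
  simp only [h, dif_pos]

theorem pvWrapB_small (t : List Char) (s : Nat) (res : List (List Char))
    (h : ¬ ((cowsayNextSp t s : Int) - (s:Int) > 39)) :
    cowsayWrapB t res s = pvContB t s (cowsayExtB t s (cowsayNextSp t s)) res := by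
  conv_lhs => rw [cowsayWrapB]
  simp only [h, pvContB]
  simp

theorem pvMain (t : List Char) : ∀ (d s : Nat) (res : List (List Char)),
    t.length - s ≤ d → s ≤ t.length →
    cowsayWrapA t res (pvSpFrom t s ++ [t.length]) ((s:Int)-1) = cowsayWrapB t res s := by
  intro d
  induction d with
  | zero =>
    intro s res h1 h2
    have hs : s = t.length := by omega
    subst hs
    rw [pvSpFrom_nil (by omega)]
    simp only [List.nil_append]
    rw [cowsayWrapA, if_neg (by omega), pvSliceFromA]
    have hj : cowsayNextSp t t.length = t.length := cowsayNextSp_eq_stop (by omega)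
    rw [pvWrapB_small t t.length res (by rw [hj]; omega), hj, pvExtB_stop (by omega), pvContB,
        if_pos (le_refl t.length), pvTakeAll]
  | succ d ih =>
    intro s res h1 h2
    have hj_ge : s ≤ cowsayNextSp t s := cowsayNextSp_ge t s
    have hj_le : cowsayNextSp t s ≤ t.length := cowsayNextSp_le t s h2
    set j := cowsayNextSp t s with hjdef
    rw [pvSpFrom_unfold t s h2, ← hjdef]
    by_cases hbig : (j:Int) - (s:Int) > 39
    · rw [pvWrapB_big t s res (by rw [← hjdef]; exact hbig)]
      have hjn : s + 39 < t.length := by omega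
      have hshift : pvSpFrom t s = pvSpFrom t (s+39) :=
        pvSpFrom_shift t (s+39) s (s+39) (by omega) (by omega) (by omega)
      have hm := ih (s+39) (res ++ [(t.drop s).take 39]) (by omega) (by omega)
      rw [← hshift, pvSpFrom_unfold t s h2, ← hjdef] at hm
      have hc : (((s+39:Nat)):Int) - 1 = (s:Int) - 1 + 39 := by push_cast; ring
      rw [hc] at hm
      by_cases hjn' : j < t.length
      · rw [if_pos hjn'] at hm ⊢
        simp only [List.cons_append] at hm ⊢
        rw [pvWrapA_chunk t res j _ _ (by omega), pvSliceChunkA]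
        exact hm
      · rw [if_neg hjn'] at hm ⊢
        simp only [List.nil_append] at hm ⊢
        rw [pvWrapA_chunk t res _ _ _ (by omega), pvSliceChunkA]
        exact hm
    · rw [pvWrapB_small t s res (by rw [← hjdef]; exact hbig), ← hjdef]
      by_cases hjn : j < t.length
      · rw [if_pos hjn]
        simp only [List.cons_append]
        have hk2_ge := cowsayNextSp_ge t (j+1)
        have hk2_le := cowsayNextSp_le t (j+1) (by omega)
        set k2 := cowsayNextSp t (j+1) with hk2def
        rw [pvSpFrom_unfold t (j+1) (by omega), ← hk2def]
        by_cases hk2n : k2 < t.length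
        · rw [if_pos hk2n]
          simp only [List.cons_append]
          rw [cowsayWrapA, if_neg (by omega)]
          by_cases hbig2 : (s:Int) + 40 ≤ (k2:Int)
          · rw [if_pos (by omega), pvSliceA]
            have hc : ((j:Int)) = (((j+1:Nat)):Int) - 1 := by push_cast; ring
            rw [pvExtB_break hjn (by omega), pvContB, if_neg (by omega), hc]
            have hm := ih (j+1) (res ++ [(t.drop s).take (j - s)]) (by omega) (by omega)
            rw [pvSpFrom_unfold t (j+1) (by omega), ← hk2def] at hm
            rw [if_pos hk2n] at hm
            simp only [List.cons_append] at hm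
            exact hm
          · rw [if_neg (by omega), pvExtB_step hjn (by omega), ← hk2def]
            have HM : ∀ s' res', s < s' → s' ≤ t.length →
                cowsayWrapA t res' (pvSpFrom t s' ++ [t.length]) ((s':Int)-1) = cowsayWrapB t res' s' := by
              intro s' res' hs1 hs2
              exact ih s' res' (by omega) hs2
            have haux := pvAux t s HM (t.length - j) j res (by omega) (by omega) hjn (by omega)
            rw [pvSpFrom_unfold t (j+1) (by omega), ← hk2def] at haux
            rw [if_pos hk2n] at haux
            simp only [List.cons_append] at haux
            rw [pvExtB_step hjn (by omega), ← hk2def] at haux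
            exact haux
        · rw [if_neg hk2n]
          simp only [List.nil_append]
          rw [cowsayWrapA, if_neg (by omega)]
          by_cases hbig2 : (s:Int) + 40 ≤ (t.length:Int)
          · rw [if_pos (by omega), pvSliceA]
            have hc : ((j:Int)) = (((j+1:Nat)):Int) - 1 := by push_cast; ring
            rw [pvExtB_break hjn (by omega), pvContB, if_neg (by omega), hc]
            have hm := ih (j+1) (res ++ [(t.drop s).take (j - s)]) (by omega) (by omega)
            rw [pvSpFrom_unfold t (j+1) (by omega), ← hk2def] at hm
            rw [if_neg hk2n] at hm
            simp only [List.nil_append] at hm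
            exact hm
          · rw [if_neg (by omega), pvExtB_step hjn (by omega), ← hk2def]
            have hk2n' : k2 = t.length := by omega
            rw [pvExtB_stop (by omega), pvContB, if_pos (by omega), hk2n']
            rw [cowsayWrapA, if_neg (by omega), pvSliceFromA, pvTakeAll]
      · have hjn' : j = t.length := by omega
        rw [if_neg hjn]
        simp only [List.nil_append]
        rw [cowsayWrapA, if_neg (by omega)]
        rw [pvExtB_stop (by omega), pvContB, if_pos (by omega), hjn', pvTakeAll, pvSliceFromA]

theorem cowsay_wrap_eq (t : List Char) :
    cowsayWrapA t [] (cowsaySpacesA t ++ [t.length]) (-1) = cowsayWrapB t [] 0 := by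
  rw [cowsaySpacesA_eq]
  have hm := pvMain t t.length 0 [] (by omega) (by omega)
  simpa using hm

-- ---- the greedy index wrap equals B's word packing ----

def pvH (st : List (List Char) × List Char) (ws : List (List Char)) : List (List Char) :=
  let r := ws.foldl bStep st
  r.1 ++ [r.2]

def pvG (res : List (List Char)) (ws : List (List Char)) : List (List Char) :=
  match ws with
  | [] => res
  | w :: ws' => pvH (bChunk res w) ws'

theorem bSplit_ne_nil (t : List Char) : bSplit t ≠ [] := by
  cases t with
  | nil => simp [bSplit]
  | cons c r =>
    unfold bSplit
    split
    · simp
    · cases h : bSplit r <;> simp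

theorem cowsayNextSp_space (t : List Char) (s : Nat)
    (h : cowsayNextSp t s < t.length) : t[cowsayNextSp t s]! = ' ' := by
  fun_induction cowsayNextSp t s with
  | case1 s hlt hsp => exact hsp
  | case2 s hlt hsp ih => exact ih h
  | case3 s hlt => omega

theorem cowsayNextSp_shift (t : List Char) : ∀ (d s m : Nat), m - s ≤ d → s ≤ m →
    m ≤ cowsayNextSp t s → cowsayNextSp t m = cowsayNextSp t s := by
  intro d
  induction d with
  | zero => intro s m h1 h2 h3; exact congrArg (cowsayNextSp t) (by omega)
  | succ d ih =>
    intro s m h1 h2 h3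
    by_cases hsm : s = m
    · rw [hsm]
    · by_cases hsl : s < t.length
      · have hsp : ¬ t[s]! = ' ' := by
          intro hc
          have := cowsayNextSp_eq_self hsl hc
          omega
        have e2 := cowsayNextSp_eq_succ hsl hsp
        rw [e2]
        exact ih (s+1) m (by omega) (by omega) (by omega)
      · have := cowsayNextSp_eq_stop hsl
        omega

-- splitting the suffix t.drop s: first word ends at the next space
theorem bSplit_drop (t : List Char) : ∀ (d s : Nat), t.length - s ≤ d → s ≤ t.length →
    bSplit (t.drop s) =
      (t.drop s).take (cowsayNextSp t s - s) ::
        (if cowsayNextSp t s < t.length then bSplit (t.drop (cowsayNextSp t s + 1)) else []) := by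
  intro d
  induction d with
  | zero =>
    intro s h1 h2
    have hs : s = t.length := by omega
    subst hs
    rw [cowsayNextSp_eq_stop (by omega)]
    simp [bSplit]
  | succ d ih =>
    intro s h1 h2
    by_cases hsl : s < t.length
    · have hdrop : t.drop s = t[s] :: t.drop (s+1) := List.drop_eq_getElem_cons hsl
      by_cases hsp : t[s]! = ' '
      · have hj := cowsayNextSp_eq_self hsl hsp
        rw [pvGetBang hsl] at hsp
        rw [hdrop, hj]
        simp [bSplit, hsp, hsl]
      · have hj := cowsayNextSp_eq_succ hsl hsp
        have hge := cowsayNextSp_ge t (s+1)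
        have hle := cowsayNextSp_le t (s+1) (by omega)
        have hih := ih (s+1) (by omega) (by omega)
        rw [pvGetBang hsl] at hsp
        rw [hj]
        conv_lhs => rw [hdrop, bSplit]
        rw [if_neg hsp, hih]
        show (t[s] :: (t.drop (s+1)).take (cowsayNextSp t (s+1) - (s+1))) ::
            (if cowsayNextSp t (s+1) < t.length then bSplit (t.drop (cowsayNextSp t (s+1) + 1)) else [])
          = (t.drop s).take (cowsayNextSp t (s+1) - s) ::
            (if cowsayNextSp t (s+1) < t.length then bSplit (t.drop (cowsayNextSp t (s+1) + 1)) else [])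
        congr 1
        rw [hdrop]
        have hd : cowsayNextSp t (s+1) - s = (cowsayNextSp t (s+1) - (s+1)) + 1 := by omega
        rw [hd, List.take_succ_cons]
    · have hs : s = t.length := by omega
      subst hs
      rw [cowsayNextSp_eq_stop (by omega)]
      simp [bSplit]

theorem pvH_cons (st : List (List Char) × List Char) (w : List Char)
    (ws : List (List Char)) : pvH st (w :: ws) = pvH (bStep st w) ws := rfl

theorem bChunk_big (acc : List (List Char)) (cur : List Char) (h : 39 < cur.length) :
    bChunk acc cur = bChunk (acc ++ [cur.take 39]) (cur.drop 39) := by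
  rw [bChunk, if_pos h]

theorem bChunk_small (acc : List (List Char)) (cur : List Char) (hle : ¬ 39 < cur.length) :
    bChunk acc cur = (acc, cur) := by
  rw [bChunk, if_neg hle]

theorem pvTakeLen (t : List Char) (s e : Nat) :
    ((t.drop s).take (e - s)).length = min (e - s) (t.length - s) := by
  simp

theorem pvAuxW (t : List Char) (s : Nat)
    (HM : ∀ s' res, s < s' → s' ≤ t.length →
      cowsayWrapB t res s' = pvG res (bSplit (t.drop s'))) :
    ∀ (d e : Nat) (res : List (List Char)), t.length - e ≤ d → s ≤ e → e ≤ t.length →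
      e - s ≤ 39 → (e < t.length → t[e]! = ' ') →
    pvContB t s (cowsayExtB t s e) res =
      pvH (res, (t.drop s).take (e - s))
        (if e < t.length then bSplit (t.drop (e+1)) else []) := by
  intro d
  induction d with
  | zero =>
    intro e res h1 h2 h3 h4 h5
    have he : e = t.length := by omega
    rw [if_neg (by omega), pvExtB_stop (by omega), pvContB, if_pos (by omega)]
    rfl
  | succ d ih =>
    intro e res h1 h2 h3 h4 h5
    by_cases he : e < t.length
    · have hk_ge := cowsayNextSp_ge t (e+1)
      have hk_le := cowsayNextSp_le t (e+1) (by omega)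
      set k := cowsayNextSp t (e+1) with hkdef
      rw [if_pos he, bSplit_drop t (t.length - (e+1)) (e+1) (by omega) (by omega), ← hkdef]
      rw [pvH_cons]
      have hcurlen : ((t.drop s).take (e - s)).length = e - s := by
        rw [pvTakeLen t s e]; omega
      have hw1len : ((t.drop (e+1)).take (k - (e+1))).length = k - (e+1) := by
        rw [pvTakeLen t (e+1) k]; omega
      by_cases hfit : k ≤ s + 39
      · -- word fits: B extends the line, the greedy ext advances to k
        have hstep : bStep (res, (t.drop s).take (e - s)) ((t.drop (e+1)).take (k - (e+1)))
            = (res, (t.drop s).take (k - s)) := by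
          unfold bStep
          rw [if_pos (by simp only [hcurlen, hw1len]; omega)]
          have hjoin : (t.drop s).take (e - s) ++ ' ' :: (t.drop (e+1)).take (k - (e+1))
              = (t.drop s).take (k - s) := by
            have hsplit : (t.drop s).take (k - s)
                = (t.drop s).take (e - s) ++ ((t.drop s).drop (e - s)).take (k - s - (e - s)) := by
              rw [← List.take_add]
              congr 1
              omega
            rw [hsplit]
            congr 1
            rw [List.drop_drop]
            have hes : s + (e - s) = e := by omega
            rw [hes, List.drop_eq_getElem_cons he]
            have hks : k - s - (e - s) = (k - (e+1)) + 1 := by omega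
            rw [hks, List.take_succ_cons]
            rw [pvGetBang he] at h5
            rw [h5 he]
          simp [hjoin]
        rw [hstep, pvExtB_step he (by omega), ← hkdef]
        have := ih k res (by omega) (by omega) (by omega) (by omega)
          (fun hkl => cowsayNextSp_space t (e+1) hkl)
        rw [this]
      · -- word does not fit: B flushes and chunks, the greedy ext breaks at e
        have hstep : bStep (res, (t.drop s).take (e - s)) ((t.drop (e+1)).take (k - (e+1)))
            = bChunk (res ++ [(t.drop s).take (e - s)]) ((t.drop (e+1)).take (k - (e+1))) := by
          unfold bStep
          rw [if_neg (by simp only [hcurlen, hw1len]; omega)]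
        rw [hstep, pvExtB_break he (by omega), pvContB, if_neg (by omega)]
        rw [HM (e+1) (res ++ [(t.drop s).take (e - s)]) (by omega) (by omega)]
        rw [bSplit_drop t (t.length - (e+1)) (e+1) (by omega) (by omega), ← hkdef]
        rfl
    · have he' : e = t.length := by omega
      rw [if_neg he, pvExtB_stop (by omega), pvContB, if_pos (by omega)]
      rfl

theorem pvMainW (t : List Char) : ∀ (d s : Nat) (res : List (List Char)),
    t.length - s ≤ d → s ≤ t.length →
    cowsayWrapB t res s = pvG res (bSplit (t.drop s)) := by
  intro d
  induction d with
  | zero =>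
    intro s res h1 h2
    have hs : s = t.length := by omega
    subst hs
    have hj := cowsayNextSp_eq_stop (t := t) (s := t.length) (by omega)
    rw [pvWrapB_small t t.length res (by rw [hj]; omega), hj, pvExtB_stop (by omega),
        pvContB, if_pos (le_refl t.length)]
    rw [bSplit_drop t 0 t.length (by omega) (by omega), hj, if_neg (by omega)]
    simp [pvG, pvH, bChunk_small, List.foldl_nil]
  | succ d ih =>
    intro s res h1 h2
    have hj_ge := cowsayNextSp_ge t s
    have hj_le := cowsayNextSp_le t s h2
    set j := cowsayNextSp t s with hjdef
    rw [bSplit_drop t (t.length - s) s (by omega) h2, ← hjdef]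
    have hwlen : ((t.drop s).take (j - s)).length = j - s := by
      rw [pvTakeLen t s j]; omega
    by_cases hbig : (j:Int) - (s:Int) > 39
    · -- over-long first word: both sides emit a 39-char chunk
      rw [pvWrapB_big t s res (by rw [← hjdef]; exact hbig)]
      have hjn : s + 39 < t.length := by omega
      rw [ih (s+39) (res ++ [(t.drop s).take 39]) (by omega) (by omega)]
      have hshift : cowsayNextSp t (s+39) = j := by
        rw [hjdef]
        exact cowsayNextSp_shift t 39 s (s+39) (by omega) (by omega) (by omega)
      rw [bSplit_drop t (t.length - (s+39)) (s+39) (by omega) (by omega), hshift]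
      show pvH (bChunk (res ++ [(t.drop s).take 39]) ((t.drop (s+39)).take (j - (s+39))))
          (if j < t.length then bSplit (t.drop (j+1)) else [])
        = pvH (bChunk res ((t.drop s).take (j - s)))
          (if j < t.length then bSplit (t.drop (j+1)) else [])
      rw [bChunk_big res ((t.drop s).take (j - s)) (by omega)]
      have e1 : ((t.drop s).take (j - s)).take 39 = (t.drop s).take 39 := by
        rw [List.take_take]
        congr 1
        omega
      have e2 : ((t.drop s).take (j - s)).drop 39 = (t.drop (s+39)).take (j - (s+39)) := by
        rw [List.drop_take, List.drop_drop]
        have hjs : j - s - 39 = j - (s + 39) := by omega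
        rw [hjs]
      rw [e1, e2]
    · -- first word fits: hand over to the extension lemma
      rw [pvWrapB_small t s res (by rw [← hjdef]; exact hbig), ← hjdef]
      have HM : ∀ s' res', s < s' → s' ≤ t.length →
          cowsayWrapB t res' s' = pvG res' (bSplit (t.drop s')) := by
        intro s' res' hs1 hs2
        exact ih s' res' (by omega) hs2
      have haux := pvAuxW t s HM (t.length - j) j res (by omega) (by omega) hj_le
        (by omega) (fun hjl => cowsayNextSp_space t s hjl)
      rw [haux]
      show pvH (res, (t.drop s).take (j - s))
          (if j < t.length then bSplit (t.drop (j+1)) else [])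
        = pvH (bChunk res ((t.drop s).take (j - s)))
          (if j < t.length then bSplit (t.drop (j+1)) else [])
      rw [bChunk_small res ((t.drop s).take (j - s)) (by rw [hwlen]; omega)]

theorem cowsay_wrapB_eq_bWrap (t : List Char) : cowsayWrapB t [] 0 = bWrap t := by
  rw [pvMainW t t.length 0 [] (by omega) (by omega)]
  simp only [List.drop_zero]
  unfold bWrap pvG pvH
  cases bSplit t <;> rfl

theorem bWrap_ne_nil (t : List Char) : bWrap t ≠ [] := by
  unfold bWrap
  rcases h : bSplit t with _ | ⟨w, ws⟩
  · exact absurd h (bSplit_ne_nil t)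
  · simp

-- ---- A's formatting loop equals B's head row plus recursive rows ----

theorem pvRows_go (nl width : Nat) (tr : List (List Char)) (i : Nat) (res : List Char) :
    tr.length = nl → 1 ≤ i →
    cowsayFmtA nl width tr i res = res ++ bRows width (tr.drop i) := by
  fun_induction cowsayFmtA nl width tr i res with
  | case1 tr i res h padded dec ih =>
    intro hlen hi
    have hilt : i < tr.length := by omega
    have hdrop : tr.drop i = tr[i]! :: tr.drop (i+1) := by
      rw [List.getElem!_eq_getElem?_getD, List.getElem?_eq_getElem hilt]
      exact List.drop_eq_getElem_cons hilt
    have hset : (tr.set i dec).drop (i+1) = tr.drop (i+1) := by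
      simp [List.drop_set]
    rw [ih (by simpa using hlen) (by omega), hset, hdrop]
    by_cases hlast : i = nl - 1
    · have hnil : tr.drop (i+1) = [] := List.drop_eq_nil_of_le (by omega)
      rw [hnil]
      simp only [dec, padded, bRows, bPad]
      split_ifs with h1
      · exact absurd h1 (by omega)
      · simp
    · have hlt2 : i + 1 < tr.length := by omega
      have hcons : tr.drop (i+1) = tr[i+1]! :: tr.drop (i+2) := by
        rw [List.getElem!_eq_getElem?_getD, List.getElem?_eq_getElem hlt2]
        exact List.drop_eq_getElem_cons hlt2
      rw [hcons]
      simp only [dec, padded, bRows, bPad]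
      split_ifs with h1
      · exact absurd h1 (by omega)
      · simp
  | case2 tr i res h =>
    intro hlen hi
    have hnil : tr.drop i = [] := List.drop_eq_nil_of_le (by omega)
    rw [hnil]
    simp [bRows]

theorem cowsay_fmt_eq_b (width : Nat) (tr : List (List Char)) (h : tr ≠ []) :
    cowsayFmtA tr.length width tr 0 [] =
      ('/' :: ' ' :: bPad width (tr.headD [])) ++ [' ', '\\', '\n'] ++
        bRows width (tr.drop 1) := by
  obtain ⟨l, ls, rfl⟩ : ∃ l ls, tr = l :: ls := by
    cases tr with
    | nil => exact absurd rfl h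
    | cons a b => exact ⟨a, b, rfl⟩
  rw [cowsayFmtA]
  rw [if_pos (by simp)]
  have hget : (l :: ls)[0]! = l := by simp
  simp only [hget]
  rw [pvRows_go _ width _ 1 _ (by simp) (le_refl 1)]
  simp [bPad]

theorem cowsay_width_eq (tr : List (List Char)) :
    (List.range tr.length).map (fun i => tr[i]!.length) = tr.map (fun l => l.length) := by
  apply List.ext_getElem
  · simp
  · intro i h1 h2
    simp only [List.length_map, List.length_range] at h1
    simp [List.getElem!_eq_getElem?_getD, List.getElem?_eq_getElem h1]

-- ===== VERDICT (by name: the statement is the Claim_ definition above) =====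
theorem cowsay_spec : Claim_equal_cowsay := by
  intro text _
  unfold Spec_cowsay cowsay cowsay_alt
  rw [cowsay_collapse_eq]
  by_cases hlen : (bCollapse text.toList).length < 40
  · simp only [hlen, if_true]
    have h5 : (('<' :: ' ' :: bCollapse text.toList) ++ (' ' :: '>' :: '\n' :: [])).length
        = (bCollapse text.toList).length + 5 := by
      simp
    rw [h5]
    have h3 : (bCollapse text.toList).length + 5 - 3
        = (bCollapse text.toList).length + 2 := by omega
    rw [h3]
    unfold bFrame
    simp
  · simp only [hlen, if_false]
    rw [cowsay_wrap_eq, cowsay_wrapB_eq_bWrap, cowsay_width_eq,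
        cowsay_fmt_eq_b _ _ (bWrap_ne_nil _)]
    unfold bFrame
    simp
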